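-- pv_equiv track=rewrite | github.com/waqarcs11/DataTools_Streamlit_Explorer | datatools_streamlit.py | classify_dtype
-- ===== SOURCE A (Python) =====
-- def is_numeric_type(dtype: str) -> bool:
--     t = dtype.upper()
--     return any(kw in t for kw in ["NUMBER", "DECIMAL", "INT", "FLOAT", "DOUBLE", "REAL"])
--
-- def is_date_type(dtype: str) -> bool:
--     t = dtype.upper()
--     return any(kw in t for kw in ["DATE", "TIME", "TIMESTAMP"])
--
-- def is_boolean_type(dtype: str) -> bool:
--     t = dtype.upper()
--     return any(kw in t for kw in ["BOOL", "BOOLEAN", "BIT"])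
--
-- def classify_dtype(dtype: str) -> str:
--     """Classify a Snowflake DATA_TYPE into one of: text, numeric, date, boolean, other."""
--     if not dtype:
--         return "other"
--     t = dtype.upper()
--     if is_numeric_type(t):
--         return "numeric"
--     if is_date_type(t):
--         return "date"
--     if is_boolean_type(t):
--         return "boolean"
--     # treat common text types as text
--     if any(kw in t for kw in ["CHAR", "VARCHAR", "STRING", "TEXT"]):
--         return "text"
--     return "other"
-- ===== SOURCE B (Python) =====
-- KEYWORDS = [
--     ("NUMBER", 0), ("DECIMAL", 0), ("INT", 0), ("FLOAT", 0), ("DOUBLE", 0), ("REAL", 0),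
--     ("DATE", 1), ("TIME", 1), ("TIMESTAMP", 1),
--     ("BOOL", 2), ("BOOLEAN", 2), ("BIT", 2),
--     ("CHAR", 3), ("VARCHAR", 3), ("STRING", 3), ("TEXT", 3),
-- ]
-- CATEGORIES = ["numeric", "date", "boolean", "text"]
--
-- def classify_dtype(dtype: str) -> str:
--     """Classify a Snowflake DATA_TYPE into one of: text, numeric, date, boolean, other."""
--     if not dtype:
--         return "other"
--     t = dtype.upper()
--     best = len(CATEGORIES)
--     for i in range(len(t)):
--         for kw, rank in KEYWORDS:
--             if rank < best and t.startswith(kw, i):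
--                 best = rank
--     return CATEGORIES[best] if best < len(CATEGORIES) else "other"
-- ===== Notes on version B (the rewrite author's own statement) =====
-- stated objective: alternative
-- what changed: Replaced the category-by-category substring cascade with a single position-major scan: one pass over the positions of the uppercased string that minimises the priority rank of any keyword starting there, then maps the best rank to its category.
import Mathlib
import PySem

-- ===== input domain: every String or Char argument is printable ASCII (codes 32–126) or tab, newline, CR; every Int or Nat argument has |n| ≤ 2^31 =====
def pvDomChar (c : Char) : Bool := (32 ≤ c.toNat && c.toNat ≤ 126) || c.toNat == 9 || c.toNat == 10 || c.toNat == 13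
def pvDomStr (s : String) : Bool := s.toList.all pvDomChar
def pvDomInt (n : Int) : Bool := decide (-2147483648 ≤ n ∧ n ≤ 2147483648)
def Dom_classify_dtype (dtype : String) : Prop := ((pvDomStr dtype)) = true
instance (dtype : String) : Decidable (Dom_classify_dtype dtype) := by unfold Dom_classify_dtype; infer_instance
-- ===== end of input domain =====

-- B replaces A's category-by-category substring cascade with one position-major scan that
-- minimises the priority rank of any keyword starting at each position (alternative; same behaviour).

-- ===== PORT A =====
def is_numeric_type (dtype : String) : Bool :=
  let t := PySem.Str.upper dtype
  (["NUMBER", "DECIMAL", "INT", "FLOAT", "DOUBLE", "REAL"]).any (fun kw => PySem.Str.isIn kw t)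

def is_date_type (dtype : String) : Bool :=
  let t := PySem.Str.upper dtype
  (["DATE", "TIME", "TIMESTAMP"]).any (fun kw => PySem.Str.isIn kw t)

def is_boolean_type (dtype : String) : Bool :=
  let t := PySem.Str.upper dtype
  (["BOOL", "BOOLEAN", "BIT"]).any (fun kw => PySem.Str.isIn kw t)

def classify_dtype (dtype : String) : String :=
  if dtype == "" then "other"
  else
    let t := PySem.Str.upper dtype
    if is_numeric_type t then "numeric"
    else if is_date_type t then "date"
    else if is_boolean_type t then "boolean"
    else if (["CHAR", "VARCHAR", "STRING", "TEXT"]).any (fun kw => PySem.Str.isIn kw t) then "text"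
    else "other"

-- ===== PORT B =====
def pvKEYWORDS : List (String × Nat) :=
  [ ("NUMBER", 0), ("DECIMAL", 0), ("INT", 0), ("FLOAT", 0), ("DOUBLE", 0), ("REAL", 0)
  , ("DATE", 1), ("TIME", 1), ("TIMESTAMP", 1)
  , ("BOOL", 2), ("BOOLEAN", 2), ("BIT", 2)
  , ("CHAR", 3), ("VARCHAR", 3), ("STRING", 3), ("TEXT", 3) ]

def pvCATEGORIES : List String := ["numeric", "date", "boolean", "text"]

-- inner loop of Source B: for kw, rank in KEYWORDS: if rank < best and t.startswith(kw, i): best = rank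
def pvInner (t : List Char) (i : Nat) (best : Nat) : Nat :=
  pvKEYWORDS.foldl
    (fun b kr => if kr.2 < b && PySem.Chars.startswith (t.drop i) kr.1.toList then kr.2 else b)
    best

def classify_dtype_alt (dtype : String) : String :=
  if dtype == "" then "other"
  else
    let t := (PySem.Str.upper dtype).toList
    let best := (List.range t.length).foldl (fun b i => pvInner t i b) pvCATEGORIES.length
    if best < pvCATEGORIES.length then pvCATEGORIES.getD best "other" else "other"

-- ===== PRECONDITION & SPEC =====
def Spec_classify_dtype (dtype : String) (out : String) : Prop := out = classify_dtype_alt dtype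
instance (dtype : String) (out : String) : Decidable (Spec_classify_dtype dtype out) := by unfold Spec_classify_dtype; infer_instance

-- ===== CLAIM =====
def Claim_equal_classify_dtype : Prop := ∀ (dtype : String), Dom_classify_dtype dtype → Spec_classify_dtype dtype (classify_dtype dtype)

-- ===== LEMMAS AND PROOFS =====

set_option maxHeartbeats 1000000

-- min-form of the inner fold over a generic keyword list
def pvBestOf (p : String → Bool) : List (String × Nat) → Nat → Nat
  | [], b => b
  | (kw, r) :: ks, b => pvBestOf p ks (if p kw then min b r else b)

theorem pvFold_eq_bestOf (ks : List (String × Nat)) (p : String → Bool) : ∀ (b : Nat),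
    ks.foldl (fun b kr => if kr.2 < b && p kr.1 then kr.2 else b) b = pvBestOf p ks b := by
  induction ks with
  | nil => intro b; rfl
  | cons kr ks ih =>
      intro b
      obtain ⟨kw, r⟩ := kr
      simp only [List.foldl_cons, pvBestOf, ih]
      congr 1
      by_cases hp : p kw
      · simp only [hp, Bool.and_true, decide_eq_true_eq]
        simp only [Nat.min_def]
        split_ifs <;> omega
      · simp [hp]

theorem pvInner_eq_bestOf (t : List Char) (i : Nat) (best : Nat) :
    pvInner t i best = pvBestOf (fun kw => PySem.Chars.startswith (t.drop i) kw.toList) pvKEYWORDS best := by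
  exact pvFold_eq_bestOf pvKEYWORDS (fun kw => PySem.Chars.startswith (t.drop i) kw.toList) best

theorem pvBestOf_le (p : String → Bool) (ks : List (String × Nat)) (b : Nat) :
    pvBestOf p ks b ≤ b := by
  induction ks generalizing b with
  | nil => simp [pvBestOf]
  | cons kr ks ih =>
      obtain ⟨kw, r⟩ := kr
      simp only [pvBestOf]
      refine le_trans (ih _) ?_
      by_cases hp : p kw <;> simp [hp]

theorem pvBestOf_min (p : String → Bool) (ks : List (String × Nat)) (b c : Nat) :
    pvBestOf p ks (min b c) = min b (pvBestOf p ks c) := by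
  induction ks generalizing b c with
  | nil => simp [pvBestOf]
  | cons kr ks ih =>
      obtain ⟨kw, r⟩ := kr
      simp only [pvBestOf]
      by_cases hp : p kw <;> simp only [hp, if_true]
      · rw [min_assoc, ih]
      · exact ih b c

-- splitting a predicate that is a pointwise disjunction
theorem pvBestOf_or (P Q R : String → Bool) (h : ∀ kw, P kw = (Q kw || R kw))
    (ks : List (String × Nat)) (b : Nat) :
    pvBestOf P ks b = min (pvBestOf Q ks b) (pvBestOf R ks b) := by
  induction ks generalizing b with
  | nil => simp [pvBestOf]
  | cons kr ks ih =>
      obtain ⟨kw, r⟩ := kr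
      cases hq : Q kw <;> cases hr : R kw
      · have hP : P kw = false := by rw [h kw, hq, hr]; rfl
        simp only [pvBestOf, hP, hq, hr, Bool.false_eq_true, if_false]
        exact ih b
      · have hP : P kw = true := by rw [h kw, hq, hr]; rfl
        simp only [pvBestOf, hP, hq, hr, Bool.false_eq_true, if_false, if_true]
        rw [ih, min_comm b r, pvBestOf_min, pvBestOf_min]
        omega
      · have hP : P kw = true := by rw [h kw, hq, hr]; rfl
        simp only [pvBestOf, hP, hq, hr, Bool.false_eq_true, if_false, if_true]
        rw [ih, min_comm b r, pvBestOf_min, pvBestOf_min]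
        omega
      · have hP : P kw = true := by rw [h kw, hq, hr]; rfl
        simp only [pvBestOf, hP, hq, hr, if_true]
        rw [ih]

-- the position scan written as structural recursion on the suffix
def pvScan (ks : List (String × Nat)) : List Char → Nat → Nat
  | [], b => b
  | c :: rest, b =>
      pvScan ks rest (pvBestOf (fun kw => PySem.Chars.startswith (c :: rest) kw.toList) ks b)

theorem pvRangeFold_eq_scan (t : List Char) (b : Nat) :
    (List.range t.length).foldl (fun b i => pvInner t i b) b = pvScan pvKEYWORDS t b := by
  induction t generalizing b with
  | nil => rfl
  | cons c rest ih =>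
      have h0 : pvInner (c :: rest) 0 b
          = pvBestOf (fun kw => PySem.Chars.startswith (c :: rest) kw.toList) pvKEYWORDS b := by
        rw [pvInner_eq_bestOf]
        simp only [List.drop_zero]
      have hfun : (fun (b : Nat) (i : Nat) => pvInner (c :: rest) (Nat.succ i) b)
          = fun (b : Nat) (i : Nat) => pvInner rest i b := by
        funext b i
        simp [pvInner, List.drop_succ_cons]
      simp only [List.length_cons, List.range_succ_eq_map, List.foldl_cons, List.foldl_map]
      rw [h0, hfun, ih]
      conv_rhs => rw [pvScan]

-- the scan computes the rank minimum over keywords occurring anywhere as infix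
theorem pvScan_spec (ks : List (String × Nat)) (hne : ∀ p ∈ ks, (p.1 : String).toList ≠ []) :
    ∀ (t : List Char) (b : Nat),
    pvScan ks t b = pvBestOf (fun kw => PySem.Chars.isIn kw.toList t) ks b := by
  intro t
  induction t with
  | nil =>
      intro b
      simp only [pvScan]
      induction ks generalizing b with
      | nil => rfl
      | cons kr ks ih =>
          obtain ⟨kw, r⟩ := kr
          have hkw : kw.toList ≠ [] := hne (kw, r) (by simp)
          have h1 : PySem.Chars.isIn kw.toList ([] : List Char) = false := by
            rw [PySem.Chars.isIn_eq_false_iff]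
            intro h
            exact hkw (List.eq_nil_of_infix_nil h)
          simp only [pvBestOf, h1, Bool.false_eq_true, if_false]
          exact ih (fun p hp => hne p (List.mem_cons_of_mem _ hp)) b
  | cons c rest ih =>
      intro b
      simp only [pvScan]
      have hdisj : ∀ kw : String,
          PySem.Chars.isIn kw.toList (c :: rest)
            = (PySem.Chars.startswith (c :: rest) kw.toList || PySem.Chars.isIn kw.toList rest) := by
        intro kw
        by_cases h : kw.toList <:+: c :: rest
        · rw [(PySem.Chars.isIn_iff_infix _ _).mpr h]
          rcases (List.infix_cons_iff).mp h with h' | h'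
          · rw [(PySem.Chars.startswith_iff _ _).mpr h', Bool.true_or]
          · rw [(PySem.Chars.isIn_iff_infix _ _).mpr h', Bool.or_true]
        · rw [(PySem.Chars.isIn_eq_false_iff _ _).mpr h]
          have h1 : PySem.Chars.startswith (c :: rest) kw.toList = false := by
            rw [Bool.eq_false_iff]; intro hx
            exact h (List.infix_cons_iff.mpr (Or.inl ((PySem.Chars.startswith_iff _ _).mp hx)))
          have h2 : PySem.Chars.isIn kw.toList rest = false := by
            rw [PySem.Chars.isIn_eq_false_iff]; intro hx
            exact h (List.infix_cons_iff.mpr (Or.inr hx))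
          rw [h1, h2]; rfl
      rw [ih, pvBestOf_or _ _ _ hdisj]
      have hxb : pvBestOf (fun kw => PySem.Chars.startswith (c :: rest) kw.toList) ks b ≤ b :=
        pvBestOf_le _ _ _
      rw [← min_eq_left hxb, pvBestOf_min]
      omega

theorem pvBestOf_append (p : String → Bool) (l1 l2 : List (String × Nat)) (b : Nat) :
    pvBestOf p (l1 ++ l2) b = pvBestOf p l2 (pvBestOf p l1 b) := by
  induction l1 generalizing b with
  | nil => rfl
  | cons kr l1 ih => obtain ⟨kw, r⟩ := kr; simp only [List.cons_append, pvBestOf, ih]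

theorem pvBestOf_group (p : String → Bool) (kws : List String) (r b : Nat) :
    pvBestOf p (kws.map (fun kw => (kw, r))) b = if kws.any p then min b r else b := by
  induction kws generalizing b with
  | nil => simp [pvBestOf]
  | cons kw kws ih =>
      simp only [List.map_cons, pvBestOf, List.any_cons, ih]
      by_cases hp : p kw
      · simp only [hp, Bool.true_or, if_true]
        by_cases hA : kws.any p = true
        · simp only [hA, if_true]
          simp only [Nat.min_def]
          split_ifs <;> omega
        · simp only [hA, Bool.false_eq_true, if_false]
      · simp only [hp, Bool.false_eq_true, Bool.false_or, if_false]

theorem upperChar_idem (c : Char) :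
    PySem.Chars.upperChar (PySem.Chars.upperChar c) = PySem.Chars.upperChar c := by
  simp only [PySem.Chars.upperChar, PySem.Chars.islower]
  split_ifs with h1 h2 <;> try rfl
  exfalso
  simp only [Bool.and_eq_true, decide_eq_true_eq] at h1 h2
  have hla : (97 : Nat) ≤ c.toNat := h1.1
  have hlb : c.toNat ≤ 122 := h1.2
  have hv : ((c.toNat - 32) : Nat).isValidChar := by constructor; omega
  have hofNat : (Char.ofNat (c.toNat - 32)).toNat = c.toNat - 32 := by
    rw [Char.toNat_ofNat]; simp [hv]
  have h2a : (97 : Nat) ≤ (Char.ofNat (c.toNat - 32)).toNat := h2.1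
  omega

theorem upper_idem (s : String) :
    PySem.Str.upper (PySem.Str.upper s) = PySem.Str.upper s := by
  simp [PySem.Str.upper, PySem.Chars.upper, upperChar_idem, Function.comp_def]

theorem pvKEYWORDS_decomp :
    pvKEYWORDS
      = (["NUMBER", "DECIMAL", "INT", "FLOAT", "DOUBLE", "REAL"].map (fun kw => (kw, 0)))
        ++ (["DATE", "TIME", "TIMESTAMP"].map (fun kw => (kw, 1)))
        ++ (["BOOL", "BOOLEAN", "BIT"].map (fun kw => (kw, 2)))
        ++ (["CHAR", "VARCHAR", "STRING", "TEXT"].map (fun kw => (kw, 3))) := by rfl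

-- ===== VERDICT =====
theorem classify_dtype_spec : Claim_equal_classify_dtype := by
  intro dtype _
  unfold Spec_classify_dtype
  by_cases h : dtype == ""
  · simp [classify_dtype, classify_dtype_alt, h]
  · have hne : ∀ p ∈ pvKEYWORDS, (p.1 : String).toList ≠ [] := by decide
    simp only [classify_dtype, classify_dtype_alt, h, if_false, Bool.false_eq_true]
    rw [pvRangeFold_eq_scan, pvScan_spec _ hne, pvKEYWORDS_decomp,
        pvBestOf_append, pvBestOf_append, pvBestOf_append,
        pvBestOf_group, pvBestOf_group, pvBestOf_group, pvBestOf_group]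
    simp only [is_numeric_type, is_date_type, is_boolean_type, upper_idem,
      PySem.Str.isIn_eq]
    set t := PySem.Str.upper dtype with ht
    by_cases hN : (["NUMBER", "DECIMAL", "INT", "FLOAT", "DOUBLE", "REAL"]).any
        (fun kw => PySem.Chars.isIn kw.toList t.toList) = true <;>
      by_cases hD : (["DATE", "TIME", "TIMESTAMP"]).any
        (fun kw => PySem.Chars.isIn kw.toList t.toList) = true <;>
      by_cases hB : (["BOOL", "BOOLEAN", "BIT"]).any
        (fun kw => PySem.Chars.isIn kw.toList t.toList) = true <;>
      by_cases hT : (["CHAR", "VARCHAR", "STRING", "TEXT"]).any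
        (fun kw => PySem.Chars.isIn kw.toList t.toList) = true <;>
      simp [hN, hD, hB, hT, pvCATEGORIES]
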